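-- pv_equiv track=rewrite | github.com/Artuuro96/interview-topics-python | problems/CountNumWays.py | count_num_ways
-- ===== SOURCE A (Python) =====
-- def is_lex_smaller(s, substr):
--     return substr > s
--
-- def count_num_ways(s, k):
--     count = 0
--     for i in range(len(s) - k + 1):
--         substring = s[i: k + i]
--         substr_reversed = substring[::-1]
--         new_string = s[:i] + substr_reversed + s[k + i:]
--         if is_lex_smaller(s, new_string):
--             count += 1
--     return count
-- ===== SOURCE B (Python) =====
-- def window_improves(s, i, k):
--     # Two pointers moving inward from the window's ends: the first differing
--     # pair decides; a palindrome (pointers meet) means reversal changes nothing.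
--     lo, hi = i, i + k - 1
--     while lo < hi and s[lo] == s[hi]:
--         lo += 1
--         hi -= 1
--     return lo < hi and s[lo] < s[hi]
--
-- def count_num_ways(s, k):
--     return sum(1 for i in range(len(s) - k + 1) if window_improves(s, i, k))
-- ===== Notes on version B (the rewrite author's own statement) =====
-- stated objective: alternative
-- what changed: A materializes the whole modified string s[:i]+s[i:i+k][::-1]+s[k+i:] and lexicographically compares it with s; B builds no strings at all: two index pointers move inward from the window's ends and the first differing character pair decides the window.
-- intended difference: For k < 0 and nonempty s, A's negative slice indices wrap around and duplicate parts of s, so A counts spurious 'ways' (always at least one); B's pointers immediately cross and it returns 0, the intended count since no window of negative length exists. — e.g. on count_num_ways("ab", -1): A returns 1, B returns 0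
import Mathlib
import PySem

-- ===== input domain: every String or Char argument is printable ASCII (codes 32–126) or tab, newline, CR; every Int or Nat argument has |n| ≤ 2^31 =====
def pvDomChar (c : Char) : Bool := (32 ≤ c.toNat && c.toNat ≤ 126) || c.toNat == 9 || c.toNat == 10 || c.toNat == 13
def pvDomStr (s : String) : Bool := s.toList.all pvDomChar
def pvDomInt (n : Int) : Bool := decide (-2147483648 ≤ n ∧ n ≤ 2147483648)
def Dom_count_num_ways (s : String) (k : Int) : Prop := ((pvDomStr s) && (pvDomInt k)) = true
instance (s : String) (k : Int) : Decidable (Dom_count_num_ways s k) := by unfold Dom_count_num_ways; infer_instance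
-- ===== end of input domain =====

-- B replaces A's rebuild-the-whole-string-and-compare step by a two-pointer scan moving
-- inward from the window's ends (no string construction); objective: alternative.

-- ===== PORT A =====
def is_lex_smaller (s : List Char) (substr : List Char) : Bool :=
  PySem.Chars.strLt s substr   -- 'substr > s' is 's < substr'

def count_num_ways (s : String) (k : Int) : Int :=
  let cs := s.toList
  (PySem.List.pyRange 0 (PySem.Str.len s - k + 1) 1).foldl
    (fun count i =>
      let substring := PySem.List.slice cs (some i) (some (k + i))
      let substr_reversed := (PySem.List.slice? substring none none (-1)).getD []
      let new_string := PySem.List.slice cs none (some i) ++ substr_reversed ++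
        PySem.List.slice cs (some (k + i)) none
      if is_lex_smaller cs new_string then count + 1 else count) 0

-- ===== PORT B =====
-- Source B's while loop: pointers lo, hi move inward while the end characters agree; the first
-- differing pair decides (the final 'lo < hi and s[lo] < s[hi]' is the loop's exit value).
-- The 'none' match arms are unreachable: every call keeps both indices inside the string
-- (Python would raise IndexError there).
def window_improves (cs : List Char) (lo hi : Int) : Bool :=
  if _h : lo < hi then
    match PySem.List.pyGet? cs lo, PySem.List.pyGet? cs hi with
    | some a, some b => if a = b then window_improves cs (lo + 1) (hi - 1) else decide (a < b)
    | _, _ => false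
  else false
termination_by (hi - lo).toNat
decreasing_by omega

def count_num_ways_alt (s : String) (k : Int) : Int :=
  let cs := s.toList
  (PySem.List.pyRange 0 (PySem.Str.len s - k + 1) 1).foldl
    (fun acc i => if window_improves cs i (i + k - 1) then acc + 1 else acc) 0

-- ===== PRECONDITION & SPEC =====
-- For k < 0 and nonempty s, A's negative slice indices wrap around and duplicate parts of s,
-- making it count spurious 'ways' (always at least one); B returns 0, the intended count since
-- no window of negative length exists.
def D_count_num_ways (s : String) (k : Int) : Prop := k < 0 ∧ s ≠ ""
instance (s : String) (k : Int) : Decidable (D_count_num_ways s k) := by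
  unfold D_count_num_ways; infer_instance

def Spec_count_num_ways (s : String) (k : Int) (out : Int) : Prop :=
  ¬ D_count_num_ways s k → out = count_num_ways_alt s k
instance (s : String) (k : Int) (out : Int) : Decidable (Spec_count_num_ways s k out) := by
  unfold Spec_count_num_ways; infer_instance

def pvDiffWitness_count_num_ways : String × Int := ("ab", -1)
def pvDiffWitnessOut_count_num_ways : Int × Int := (1, 0)

-- ===== CLAIM (what is proved, stated in full; the proofs are below) =====
def Claim_unchanged_count_num_ways : Prop := ∀ (s : String) (k : Int),
  Dom_count_num_ways s k → Spec_count_num_ways s k (count_num_ways s k)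
def Claim_changed_count_num_ways : Prop :=
  Dom_count_num_ways (pvDiffWitness_count_num_ways.1) (pvDiffWitness_count_num_ways.2) ∧
  D_count_num_ways (pvDiffWitness_count_num_ways.1) (pvDiffWitness_count_num_ways.2) ∧
  count_num_ways (pvDiffWitness_count_num_ways.1) (pvDiffWitness_count_num_ways.2) = pvDiffWitnessOut_count_num_ways.1 ∧
  count_num_ways_alt (pvDiffWitness_count_num_ways.1) (pvDiffWitness_count_num_ways.2) = pvDiffWitnessOut_count_num_ways.2 ∧
  pvDiffWitnessOut_count_num_ways.1 ≠ pvDiffWitnessOut_count_num_ways.2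
def Claim_exact_count_num_ways : Prop := ∀ (s : String) (k : Int),
  Dom_count_num_ways s k → D_count_num_ways s k →
  count_num_ways s k ≠ count_num_ways_alt s k

-- ===== LEMMAS AND PROOFS =====

-- equal-length middles compare like the full strings (common prefix and suffix cancel)
theorem lex_mid_iff (a u v c : List Char) (h : u.length = v.length) :
    (a ++ (u ++ c)) < (a ++ (v ++ c)) ↔ u < v := by
  induction a with
  | nil =>
    simp only [List.nil_append]
    induction u generalizing v with
    | nil =>
      cases v with
      | nil => simp
      | cons y v => simp at h
    | cons x u ih =>
      cases v with
      | nil => simp at h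
      | cons y v =>
        simp only [List.cons_append, List.cons_lt_cons_iff]
        rw [ih v (by simpa using h)]
  | cons x a ih =>
    rw [List.cons_append, List.cons_append, List.cons_lt_cons_iff, ih]
    simp

-- a one-character 'wrap' peels off a lexicographic comparison with the reverse
theorem cons_wrap_lt_iff (x y : Char) (m : List Char) :
    ((x :: (m ++ [y])) < (y :: (m.reverse ++ [x]))) ↔
      (if x = y then m < m.reverse else x < y) := by
  rw [List.cons_lt_cons_iff]
  by_cases hxy : x = y
  · subst hxy
    rw [if_pos rfl]
    constructor
    · rintro (h | ⟨-, h⟩)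
      · exact absurd h (lt_irrefl x)
      · exact (lex_mid_iff [] m m.reverse [x] (by simp)).1 (by simpa using h)
    · intro h
      exact Or.inr ⟨rfl, by simpa using (lex_mid_iff [] m m.reverse [x] (by simp)).2 h⟩
  · simp [hxy]

-- the window slice peels into first char, middle slice, last char
theorem slice_decomp (cs : List Char) (a b : Nat) (hab : a < b) (hb : b < cs.length) :
    PySem.List.slice cs (some (a : Int)) (some ((b : Int) + 1)) =
      cs[a] :: (PySem.List.slice cs (some ((a : Int) + 1)) (some (b : Int)) ++ [cs[b]]) := by
  rw [PySem.List.slice_toNat cs (by omega) (by omega),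
      PySem.List.slice_toNat cs (by omega) (by omega)]
  have e1 : ((a : Int)).toNat = a := by omega
  have e2 : (((b : Int)) + 1).toNat = b + 1 := by omega
  have e3 : (((a : Int)) + 1).toNat = a + 1 := by omega
  have e4 : ((b : Int)).toNat = b := by omega
  rw [e1, e2, e3, e4]
  rw [List.drop_eq_getElem_cons (by omega)]
  have e5 : b + 1 - a = (b - a) + 1 := by omega
  rw [e5, List.take_succ_cons]
  congr 1
  have e6 : b - a = (b - (a + 1)) + 1 := by omega
  rw [e6, List.take_add_one]
  congr 1
  rw [List.getElem?_drop]
  have e7 : a + 1 + (b - (a + 1)) = b := by omega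
  rw [e7, List.getElem?_eq_getElem hb]
  rfl

-- the two-pointer scan decides 'window < reversed window'
theorem scan_eq (cs : List Char) : ∀ (d a b : Nat), b - a = d → a ≤ b → b < cs.length →
    window_improves cs (a : Int) (b : Int) =
      PySem.Chars.strLt (PySem.List.slice cs (some (a : Int)) (some ((b : Int) + 1)))
        (PySem.List.slice cs (some (a : Int)) (some ((b : Int) + 1))).reverse := by
  intro d
  induction d using Nat.strong_induction_on with
  | _ d ih =>
    intro a b hd hab hb
    by_cases h : a < b
    · have hga : PySem.List.pyGet? cs (a : Int) = some cs[a] := by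
        rw [PySem.List.pyGet?_natCast]
        exact List.getElem?_eq_getElem (by omega)
      have hgb : PySem.List.pyGet? cs (b : Int) = some cs[b] := by
        rw [PySem.List.pyGet?_natCast]
        exact List.getElem?_eq_getElem hb
      rw [window_improves, dif_pos (by exact_mod_cast h)]
      simp only [hga, hgb]
      rw [slice_decomp cs a b h hb]
      have hrev : (cs[a] :: (PySem.List.slice cs (some ((a : Int) + 1)) (some (b : Int)) ++ [cs[b]])).reverse
          = cs[b] :: ((PySem.List.slice cs (some ((a : Int) + 1)) (some (b : Int))).reverse ++ [cs[a]]) := by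
        simp
      rw [hrev]
      set M := PySem.List.slice cs (some ((a : Int) + 1)) (some (b : Int)) with hM
      have hR : PySem.Chars.strLt (cs[a] :: (M ++ [cs[b]])) (cs[b] :: (M.reverse ++ [cs[a]]))
          = decide (if cs[a] = cs[b] then M < M.reverse else cs[a] < cs[b]) := by
        simp only [PySem.Chars.strLt]
        exact decide_eq_decide.mpr (cons_wrap_lt_iff cs[a] cs[b] M)
      rw [hR]
      have hdec : ∀ (p q : Prop) (hp : Decidable p) (hq : Decidable q), (p ↔ q) →
          @decide p hp = @decide q hq := by
        intro p q hp hq hpq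
        exact decide_eq_decide.mpr hpq
      by_cases hc : cs[a] = cs[b]
      · rw [if_pos hc, hdec _ (M < M.reverse) _ _ (by rw [if_pos hc])]
        by_cases h2 : a + 1 ≤ b - 1 ∧ a + 1 < b
        · have := ih (b - 1 - (a + 1)) (by omega) (a + 1) (b - 1) rfl (by omega) (by omega)
          have ca : (((a + 1 : Nat)) : Int) = (a : Int) + 1 := by push_cast; ring
          have cb : (((b - 1 : Nat)) : Int) = (b : Int) - 1 := by omega
          rw [ca, cb] at this
          have cb1 : ((b : Int) - 1) + 1 = (b : Int) := by ring
          rw [cb1] at this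
          rw [this]
          rfl
        · -- b = a + 1 : the middle is empty and the recursive call exits at once
          have hba : b = a + 1 := by omega
          have hMnil : M = [] := by
            rw [hM, hba, PySem.List.slice_toNat cs (by omega) (by omega)]
            simp
          have hnot : ¬ (M < M.reverse) := by
            rw [hMnil]
            exact List.lt_irrefl []
          rw [decide_eq_false hnot, window_improves, dif_neg (by omega)]
      · rw [if_neg hc]
        exact (hdec _ _ _ _ (by rw [if_neg hc])).symm
    · -- a = b : single-character window, never counted
      have hba : a = b := by omega
      subst hba
      rw [window_improves, dif_neg (by omega)]
      have hone : PySem.List.slice cs (some (a : Int)) (some ((a : Int) + 1)) = [cs[a]] := by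
        rw [PySem.List.slice_toNat cs (by omega) (by omega)]
        have e1 : ((a : Int)).toNat = a := by omega
        have e2 : (((a : Int)) + 1).toNat = a + 1 := by omega
        rw [e1, e2, show a + 1 - a = 1 from by omega, List.drop_eq_getElem_cons (by omega)]
        rfl
      rw [hone]
      simp [PySem.Chars.strLt]

-- per-index agreement: A's whole-string test equals 'window < reversed window' (0 ≤ k)
theorem body_iff (cs : List Char) (k i : Int) (hk : 0 ≤ k) (hi : 0 ≤ i) :
    (is_lex_smaller cs
        (PySem.List.slice cs none (some i) ++
          ((PySem.List.slice? (PySem.List.slice cs (some i) (some (k + i))) none none (-1)).getD []) ++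
          PySem.List.slice cs (some (k + i)) none) = true)
      ↔ (PySem.Chars.strLt (PySem.List.slice cs (some i) (some (k + i)))
          (PySem.List.slice cs (some i) (some (k + i))).reverse = true) := by
  have hki : 0 ≤ k + i := by omega
  set w := PySem.List.slice cs (some i) (some (k + i)) with hw
  have hwdt : w = (cs.drop i.toNat).take ((k + i).toNat - i.toNat) :=
    PySem.List.slice_toNat cs hi hki
  rw [show (PySem.List.slice? w none none (-1)).getD [] = w.reverse by
        rw [PySem.List.slice?_none_none_neg_one]; rfl,
      PySem.List.slice_to cs hi, PySem.List.slice_from cs hki]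
  have hsplit : cs = cs.take i.toNat ++ (w ++ cs.drop (k + i).toNat) := by
    rw [hwdt]
    have h1 : (cs.drop i.toNat).take ((k + i).toNat - i.toNat) ++ cs.drop (k + i).toNat
        = cs.drop i.toNat := by
      have h2 : cs.drop (k + i).toNat = (cs.drop i.toNat).drop ((k + i).toNat - i.toNat) := by
        rw [List.drop_drop]
        congr 1
        omega
      rw [h2, List.take_append_drop]
    rw [h1, List.take_append_drop]
  have hlt_iff : (cs < cs.take i.toNat ++ (w.reverse ++ cs.drop ((k + i).toNat)))
      ↔ w < w.reverse := by
    nth_rewrite 1 [hsplit]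
    exact lex_mid_iff _ w w.reverse _ (by simp)
  have hlex : is_lex_smaller cs
      (cs.take i.toNat ++ w.reverse ++ cs.drop ((k + i).toNat)) = true ↔ w < w.reverse := by
    show PySem.Chars.strLt _ _ = true ↔ _
    rw [List.append_assoc]
    simp only [PySem.Chars.strLt, decide_eq_true_eq]
    exact hlt_iff
  rw [hlex]
  simp only [PySem.Chars.strLt, decide_eq_true_eq]

-- B counts nothing once the pointers start crossed (k ≤ 0)
theorem alt_zero_of_nonpos (s : String) (k : Int) (hk : k ≤ 0) : count_num_ways_alt s k = 0 := by
  unfold count_num_ways_alt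
  rw [PySem.List.foldl_congr_mem _ _ (fun (acc : Int) (_ : Int) => acc) 0 (by
    intro acc i _
    rw [window_improves, dif_neg (by omega)]
    simp), PySem.List.foldl_ignore]

-- a proper prefix is lexicographically smaller
theorem prefix_lt_append (cs t : List Char) (h : t ≠ []) : cs < cs ++ t := by
  induction cs with
  | nil =>
    cases t with
    | nil => exact absurd rfl h
    | cons c t => exact List.Lex.nil
  | cons x cs ih =>
    rw [List.cons_append, List.cons_lt_cons_iff]
    exact Or.inr ⟨rfl, ih⟩

theorem foldl_ge_of_mono (l : List Int) (f : Int → Int → Int)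
    (hmono : ∀ c i, c ≤ f c i) : ∀ (a : Int), a ≤ l.foldl f a := by
  induction l with
  | nil => intro a; exact le_refl a
  | cons y l ih =>
    intro a
    exact le_trans (hmono a y) (ih (f a y))

theorem foldl_succ_of_witness (l : List Int) (f : Int → Int → Int)
    (hmono : ∀ c i, c ≤ f c i) (x : Int) (hup : ∀ c, c + 1 ≤ f c x) :
    ∀ (a : Int), x ∈ l → a + 1 ≤ l.foldl f a := by
  induction l with
  | nil => intro a hx; simp at hx
  | cons y l ih =>
    intro a hx
    rw [List.foldl_cons]
    rcases List.mem_cons.mp hx with hxy | hxl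
    · subst hxy
      exact le_trans (hup a) (foldl_ge_of_mono l f hmono (f a x))
    · exact le_trans (by have := hmono a y; omega) (ih (f a y) hxl)

-- inside D_ B's scan never fires, while A always counts the spurious index i = len(s)
-- (there new_string = s ++ (a nonempty piece of s) > s)
theorem count_num_ways_tight' (s : String) (k : Int) (hk : k < 0) (hs : s ≠ "") :
    count_num_ways s k ≠ count_num_ways_alt s k := by
  have hnil : s.toList ≠ [] := by
    intro hn
    apply hs
    rw [← @String.ofList_toList s, hn]
  have hlen : 1 ≤ s.toList.length := by
    cases h : s.toList with
    | nil => exact absurd h hnil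
    | cons c t => simp
  set cs := s.toList with hcs
  set n : Int := (cs.length : Int) with hn
  have hB : count_num_ways_alt s k = 0 := alt_zero_of_nonpos s k (le_of_lt hk)
  have hA : 1 ≤ count_num_ways s k := by
    unfold count_num_ways
    simp only []
    have hmono : ∀ (c i : Int), c ≤ (fun count i =>
        let substring := PySem.List.slice cs (some i) (some (k + i))
        let substr_reversed := (PySem.List.slice? substring none none (-1)).getD []
        let new_string := PySem.List.slice cs none (some i) ++ substr_reversed ++
          PySem.List.slice cs (some (k + i)) none
        if is_lex_smaller cs new_string then count + 1 else count) c i := by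
      intro c i
      simp only []
      split_ifs <;> omega
    have hmem : n ∈ PySem.List.pyRange 0 (PySem.Str.len s - k + 1) 1 := by
      rw [PySem.List.mem_pyRange_one, PySem.Str.len_eq, ← hcs]
      constructor
      · omega
      · omega
    have hcond : is_lex_smaller cs
        (PySem.List.slice cs none (some n) ++
          ((PySem.List.slice? (PySem.List.slice cs (some n) (some (k + n))) none none (-1)).getD []) ++
          PySem.List.slice cs (some (k + n)) none) = true := by
      have e1 : PySem.List.slice cs (some n) (some (k + n)) = [] := by
        apply List.eq_nil_of_length_eq_zero
        rw [PySem.List.length_slice]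
        have h1 : PySem.List.clampIdx cs.length n = cs.length := by
          rw [hn, PySem.List.clampIdx_natCast]
          omega
        have h2 : PySem.List.clampIdx cs.length (k + n) ≤ cs.length :=
          PySem.List.clampIdx_le cs.length (k + n)
        omega
      have e2 : PySem.List.slice cs none (some n) = cs := by
        rw [PySem.List.slice_to cs (by omega)]
        have : n.toNat = cs.length := by omega
        rw [this, List.take_length]
      have hclamp : PySem.List.clampIdx cs.length (k + n) < cs.length := by
        simp only [PySem.List.clampIdx]
        split_ifs <;> omega
      have e3 : PySem.List.slice cs (some (k + n)) none =
          cs.drop (PySem.List.clampIdx cs.length (k + n)) :=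
        PySem.List.slice_some_none cs (k + n)
      have hne : cs.drop (PySem.List.clampIdx cs.length (k + n)) ≠ [] := by
        intro hd
        have := congrArg List.length hd
        rw [List.length_drop] at this
        simp at this
        omega
      rw [e1, e2, e3, PySem.List.slice?_none_none_neg_one]
      simp only [Option.getD_some, List.reverse_nil, List.append_nil]
      simp only [is_lex_smaller, PySem.Chars.strLt, decide_eq_true_eq]
      exact prefix_lt_append cs _ hne
    have hup : ∀ (c : Int), c + 1 ≤ (fun count i =>
        let substring := PySem.List.slice cs (some i) (some (k + i))
        let substr_reversed := (PySem.List.slice? substring none none (-1)).getD []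
        let new_string := PySem.List.slice cs none (some i) ++ substr_reversed ++
          PySem.List.slice cs (some (k + i)) none
        if is_lex_smaller cs new_string then count + 1 else count) c n := by
      intro c
      simp only []
      rw [if_pos hcond]
    exact foldl_succ_of_witness _ _ hmono n hup 0 hmem
  omega

-- ===== VERDICT (by name: the statement is the Claim_ definition above) =====
theorem count_num_ways_spec : Claim_unchanged_count_num_ways := by
  intro s k _ hnd
  by_cases hk : 0 ≤ k
  · unfold count_num_ways count_num_ways_alt
    simp only []
    apply PySem.List.foldl_congr_mem
    intro acc i hmem
    rw [PySem.List.mem_pyRange_one, PySem.Str.len_eq] at hmem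
    obtain ⟨hi0, hi1⟩ := hmem
    by_cases hk0 : k = 0
    · subst hk0
      rw [window_improves, dif_neg (by omega)]
      have he : PySem.List.slice s.toList (some i) (some (0 + i)) = [] := by
        rw [PySem.List.slice_toNat s.toList hi0 (by omega)]
        simp
      rw [if_neg (by
        rw [(body_iff s.toList 0 i (by omega) hi0), he]
        simp [PySem.Chars.strLt])]
      simp
    · -- 1 ≤ k : both tests decide 'window < reversed window'
      have hk1 : 1 ≤ k := by omega
      set a : Nat := i.toNat with ha
      set b : Nat := (i + k - 1).toNat with hbdef
      have hai : (a : Int) = i := by omega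
      have hbi : (b : Int) = i + k - 1 := by omega
      have hb : b < s.toList.length := by omega
      have hscan := scan_eq s.toList (b - a) a b rfl (by omega) hb
      rw [hai, hbi] at hscan
      have hik : (i + k - 1) + 1 = k + i := by ring
      rw [hik] at hscan
      rw [hscan]
      exact if_congr (body_iff s.toList k i hk hi0) rfl rfl
  · -- ¬ D and k < 0 force s = "" ; both sides are 0
    have hs : s = "" := by
      by_contra hne
      exact hnd ⟨by omega, hne⟩
    subst hs
    rw [alt_zero_of_nonpos "" k (by omega)]
    unfold count_num_ways
    have hnil : ("" : String).toList = [] := rfl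
    rw [hnil]
    rw [PySem.List.foldl_congr_mem _ _ (fun (acc : Int) (_ : Int) => acc) 0 (by
      intro acc i _
      have e1 : PySem.List.slice ([] : List Char) (some i) (some (k + i)) = [] := by
        simp [PySem.List.slice]
      have e2 : PySem.List.slice ([] : List Char) none (some i) = [] := by
        simp [PySem.List.slice]
      have e3 : PySem.List.slice ([] : List Char) (some (k + i)) none = [] := by
        simp [PySem.List.slice]
      rw [if_neg (by
        rw [e1, e2, e3, PySem.List.slice?_none_none_neg_one]
        simp only [is_lex_smaller, PySem.Chars.strLt, Option.getD_some, List.reverse_nil,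
          List.append_nil, decide_eq_true_eq]
        exact List.lt_irrefl [])]), PySem.List.foldl_ignore]

theorem count_num_ways_changed : Claim_changed_count_num_ways := by
  unfold Claim_changed_count_num_ways
  refine ⟨by decide, by decide, by decide, ?_, by decide⟩
  exact alt_zero_of_nonpos "ab" (-1) (by norm_num)

theorem count_num_ways_tight : Claim_exact_count_num_ways := by
  intro s k _ hD
  exact count_num_ways_tight' s k hD.1 hD.2
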